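-- pv_equiv track=rewrite | github.com/anna-aleksandrova/ads_course | homeworks/hw03/t03_04_e27.py | max_shifts
-- ===== SOURCE A (Python) =====
-- import math
--
-- def lcyclic_shift(n, am):
--     """Left cyclic shift of binary representation of <n>.
--     1000 -> 0001
--     """
--     high = n >> (am - 1)
--     res = ((n - (high << (am - 1))) << 1) + high
--     return res
--
-- def max_shifts(n):
--     am = int(math.log(n, 2)) + 1
--     res = n
--     for i in range(am-1):
--         n = lcyclic_shift(n, am)
--         if n > res:
--             res = n
--     return res
-- ===== SOURCE B (Python) =====
-- def max_shifts(n):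
--     L = n.bit_length()
--     return max(((n << i) | (n >> (L - i))) & ((1 << L) - 1) for i in range(L))
-- ===== Notes on version B (the rewrite author's own statement) =====
-- stated objective: idiomatic
-- what changed: B computes every cyclic rotation independently as ((n << i) | (n >> (L - i))) & ((1 << L) - 1) and takes one max over a generator, instead of A's loop that threads the shifted value and a running maximum through state and derives each rotation from the previous one.
-- outside the precondition, e.g. on max_shifts(0): A raises ValueError, B raises ValueError
import Mathlib
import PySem

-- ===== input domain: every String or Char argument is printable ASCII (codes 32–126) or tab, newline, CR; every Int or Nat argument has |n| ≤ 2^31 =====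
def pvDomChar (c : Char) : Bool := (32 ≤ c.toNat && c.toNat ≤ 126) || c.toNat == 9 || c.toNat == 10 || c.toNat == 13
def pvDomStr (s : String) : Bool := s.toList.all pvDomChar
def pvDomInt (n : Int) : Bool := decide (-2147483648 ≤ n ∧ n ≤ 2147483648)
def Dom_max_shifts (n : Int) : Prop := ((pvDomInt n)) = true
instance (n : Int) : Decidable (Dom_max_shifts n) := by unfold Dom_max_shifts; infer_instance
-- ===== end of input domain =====

-- B computes each cyclic rotation of n's bit string independently with shifts and a mask and takes
-- one max over them (idiomatic bit-rotation), instead of A's loop threading a shifted value and a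
-- running maximum through state.


-- ===== PORT A =====
-- Python `x >> k` / `x << k` are Lean's `>>>` / `<<<` (k : Nat; am - 1 ≥ 0 on every call made
-- under Pre_, so `.toNat` is exact there).
def lcyclic_shift (n : Int) (am : Int) : Int :=
  let high := n >>> (am - 1).toNat
  ((n - (high <<< (am - 1).toNat)) <<< (1 : Nat)) + high

def max_shifts (n : Int) : Int :=
  -- `int(math.log(n, 2))` ported as bit_length - 1: exact for 1 ≤ n ≤ 2^31 (the whole of
  -- Dom ∩ Pre_; verified against CPython's float log over that range).
  let am : Int := ((PySem.Int.bitLength n - 1 : Nat) : Int) + 1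
  let st := (PySem.List.pyRange 0 (am - 1) 1).foldl
    (fun (st : Int × Int) _ =>
      let n' := lcyclic_shift st.1 am
      (n', if n' > st.2 then n' else st.2)) (n, n)
  st.2

-- ===== PORT B =====
def max_shifts_alt (n : Int) : Int :=
  let L := PySem.Int.bitLength n
  let vals := (List.range L).map (fun i : Nat =>
    PySem.Int.band (PySem.Int.bor (n <<< i) (n >>> (L - i))) (((1 : Int) <<< L) - 1))
  -- max() of the empty generator raises ValueError; unreachable under Pre_ (then L ≥ 1)
  (PySem.List.max? vals (fun y => y)).getD 0

-- ===== PRECONDITION & SPEC =====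
-- Pre_ excludes n ≤ 0, on which A raises ValueError (math.log domain error).
def Pre_max_shifts (n : Int) : Prop := 1 ≤ n
instance (n : Int) : Decidable (Pre_max_shifts n) := by unfold Pre_max_shifts; infer_instance
def pvWitness_max_shifts : Int := 12

def Spec_max_shifts (n : Int) (out : Int) : Prop := out = max_shifts_alt n
instance (n : Int) (out : Int) : Decidable (Spec_max_shifts n out) := by unfold Spec_max_shifts; infer_instance

-- ===== CLAIM (what is proved, stated in full; the proofs are below) =====
def Claim_equal_max_shifts : Prop := ∀ (n : Int), Dom_max_shifts n → Pre_max_shifts n → Spec_max_shifts n (max_shifts n)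

-- ===== LEMMAS AND PROOFS =====

-- one arithmetic left-rotation of an L-bit value, on the Nat side
def rotN (L : Nat) (v : Nat) : Nat := (v % 2^(L-1)) * 2 + v / 2^(L-1)

-- a fold that ignores the list's elements is an iterate of its step
theorem foldl_const_iterate {α β : Type} (g : β → β) :
    ∀ (l : List α) (init : β), l.foldl (fun st _ => g st) init = g^[l.length] init := by
  intro l
  induction l with
  | nil => intro init; simp
  | cons x xs ih =>
    intro init
    simp [List.foldl_cons, ih, Function.iterate_succ_apply]

-- disjoint OR is addition: the low i bits of a * 2^i are clear
theorem mul_pow_lor_add (a i : Nat) : ∀ b < 2^i, (a * 2^i) ||| b = a * 2^i + b := by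
  induction i with
  | zero => intro b hb; interval_cases b <;> simp
  | succ i ih =>
    intro b hb
    have h1 : a * 2^(i+1) = Nat.bit false (a * 2^i) := by
      simp only [Nat.bit, cond]; ring
    have h2 : b = Nat.bit (b % 2 == 1) (b / 2) := by
      rcases Nat.mod_two_eq_zero_or_one b with h | h <;> simp [Nat.bit, h]
      all_goals omega
    rw [h1, h2, Nat.lor_bit]
    have ihb := ih (b/2) (by omega)
    rcases Nat.mod_two_eq_zero_or_one b with h | h <;>
      simp [Nat.bit, h, ihb] <;> omega

-- A's shift, on a nonnegative value, is rotN
theorem lcyclic_cast (L : Nat) (hL : 1 ≤ L) (w : Nat) :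
    lcyclic_shift (↑w) (↑L) = ↑(rotN L w) := by
  have htn : ((L : Int) - 1).toNat = L - 1 := by omega
  have hdiv : (↑w : Int) >>> (L - 1) = ↑(w / 2^(L-1)) := by
    rw [Int.shiftRight_eq_div_pow, Int.ofNat_ediv_ofNat]
  simp only [lcyclic_shift, htn, hdiv, Int.shiftLeft_eq, rotN]
  have hwd : (2:Int)^(L-1) * ((w : Int) / 2^(L-1)) + (w : Int) % 2^(L-1) = (w : Int) :=
    Int.mul_ediv_add_emod _ _
  push_cast
  linear_combination (-2:Int) * hwd

-- iterating rotN: the closed form of rotation by i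
theorem rotN_iterate (L : Nat) (hL : 1 ≤ L) (m : Nat) (hm : m < 2^L) :
    ∀ i, i ≤ L → (rotN L)^[i] m = (m % 2^(L-i)) * 2^i + m / 2^(L-i) := by
  intro i
  induction i with
  | zero => intro _; simp [Nat.mod_eq_of_lt hm, Nat.div_eq_of_lt hm]
  | succ i ih =>
    intro hiL
    have hi : i ≤ L := by omega
    rw [Function.iterate_succ_apply', ih hi]
    set e := L - (i+1) with he
    have hLi : L - i = e + 1 := by omega
    have hL1 : L - 1 = i + e := by omega
    set r := m % 2^e with hr
    set b := (m / 2^e) % 2 with hb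
    set d := m / 2^(e+1) with hd
    have fact1 : m % 2^(e+1) = m % 2^e + 2^e * (m / 2^e % 2) := Nat.mod_pow_succ
    have fact2 : 2 * d + b = m / 2^e := by
      have h1 : m / 2^(e+1) = m / 2^e / 2 := by
        rw [pow_succ, ← Nat.div_div_eq_div_mul]
      have h2 := Nat.div_add_mod (m / 2^e) 2
      omega
    have hrlt : r < 2^e := Nat.mod_lt _ (by positivity)
    have hble : b ≤ 1 := by omega
    have hdlt : d < 2^i := by
      rw [hd, Nat.div_lt_iff_lt_mul (by positivity)]
      calc m < 2^L := hm
        _ = 2^i * 2^(e+1) := by rw [← pow_add]; congr 1; omega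
    have hslt : r * 2^i + d < 2^(i+e) := by
      have h1 : r * 2^i ≤ (2^e - 1) * 2^i := Nat.mul_le_mul_right _ (by omega)
      have h2 : (2^e - 1) * 2^i = 2^(i+e) - 2^i := by
        rw [Nat.sub_mul, one_mul, ← pow_add]; ring_nf
      have h3 : (2:Nat)^i ≤ 2^(i+e) := Nat.pow_le_pow_right (by norm_num) (by omega)
      omega
    have hg : (m % 2^(L-i)) * 2^i + m / 2^(L-i) = (r * 2^i + d) + b * 2^(i+e) := by
      rw [hLi, fact1, ← hr, ← hb, ← hd]
      ring
    rw [hg, rotN, hL1]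
    have hdiv : ((r * 2^i + d) + b * 2^(i+e)) / 2^(i+e) = b := by
      rw [Nat.add_mul_div_right _ _ (by positivity), Nat.div_eq_of_lt hslt, Nat.zero_add]
    have hmod : ((r * 2^i + d) + b * 2^(i+e)) % 2^(i+e) = r * 2^i + d := by
      rw [Nat.add_mul_mod_self_right, Nat.mod_eq_of_lt hslt]
    rw [hdiv, hmod]
    have : r * 2^(i+1) = r * 2^i * 2 := by ring
    omega

-- B's shift-or-mask expression computes the same closed form
theorem bfun_eq (L : Nat) (_hL : 1 ≤ L) (m : Nat) (hm : m < 2^L) (i : Nat) (hi : i ≤ L) :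
    PySem.Int.band (PySem.Int.bor ((↑m : Int) <<< i) ((↑m : Int) >>> (L - i))) (((1 : Int) <<< L) - 1)
      = ↑((m % 2^(L-i)) * 2^i + m / 2^(L-i)) := by
  set d := m / 2^(L-i) with hd
  have hdlt : d < 2^i := by
    rw [hd, Nat.div_lt_iff_lt_mul (by positivity)]
    calc m < 2^L := hm
      _ ≤ 2^i * 2^(L-i) := by rw [← pow_add]; apply Nat.pow_le_pow_right (by norm_num); omega
  have hshl : ((↑m : Int) <<< i) = ((m * 2^i : Nat) : Int) := by
    rw [Int.shiftLeft_eq]; push_cast; ring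
  have hshr : ((↑m : Int) >>> (L - i)) = (d : Int) := by
    rw [Int.shiftRight_eq_div_pow, Int.ofNat_ediv_ofNat]
  have hmask : ((1 : Int) <<< L) - 1 = ((2^L - 1 : Nat) : Int) := by
    rw [Int.shiftLeft_eq]
    have : (1:Nat) ≤ 2^L := Nat.one_le_two_pow
    push_cast [this]; ring
  rw [hshl, hshr, hmask, PySem.Int.bor_of_nonneg (by positivity) (by positivity)]
  simp only [Int.toNat_natCast]
  rw [mul_pow_lor_add m i d hdlt]
  rw [PySem.Int.band_of_nonneg (by positivity) (by positivity)]
  simp only [Int.toNat_natCast]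
  rw [Nat.and_two_pow_sub_one_eq_mod]
  congr 1
  have hsplit : m * 2^i + d = ((m % 2^(L-i)) * 2^i + d) + (m / 2^(L-i)) * 2^L := by
    have h1 := Nat.div_add_mod m (2^(L-i))
    have h2 : m / 2^(L-i) * 2^(L-i) * 2^i = m / 2^(L-i) * 2^L := by
      rw [mul_assoc, ← pow_add]; congr 2; omega
    nlinarith [h1, h2]
  have hslt : (m % 2^(L-i)) * 2^i + d < 2^L := by
    have hrlt : m % 2^(L-i) < 2^(L-i) := Nat.mod_lt _ (by positivity)
    have h1 : (m % 2^(L-i)) * 2^i ≤ (2^(L-i) - 1) * 2^i := Nat.mul_le_mul_right _ (by omega)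
    have h2 : (2^(L-i) - 1) * 2^i = 2^L - 2^i := by
      rw [Nat.sub_mul, one_mul, ← pow_add]
      congr 2; omega
    have h3 : (2:Nat)^i ≤ 2^L := Nat.pow_le_pow_right (by norm_num) (by omega)
    omega
  rw [hsplit, Nat.add_mul_mod_self_right, Nat.mod_eq_of_lt hslt]

-- A's loop body, iterated: first component is the iterate, second the running max
theorem hIter (f : Int → Int) (a : Int) :
    ∀ k : Nat, (fun st : Int × Int => (f st.1, if f st.1 > st.2 then f st.1 else st.2))^[k] (a, a)
      = (f^[k] a, ((List.range k).map (fun i => f^[i+1] a)).foldl max a) := by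
  intro k
  induction k with
  | zero => simp
  | succ k ih =>
    rw [Function.iterate_succ_apply', ih]
    have hmax : ∀ v M : Int, (if v > M then v else M) = max M v := by
      intro v M; simp only [max_def]; split_ifs <;> omega
    simp only [List.range_succ, List.map_append, List.map_cons, List.map_nil,
      List.foldl_append, List.foldl_cons, List.foldl_nil]
    rw [hmax, ← Function.iterate_succ_apply' f]

-- casts commute with the iterate of A's shift
theorem iter_cast (L : Nat) (hL : 1 ≤ L) (m : Nat) :
    ∀ i : Nat, (fun v => lcyclic_shift v (↑L))^[i] (↑m) = ↑((rotN L)^[i] m) := by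
  intro i
  induction i with
  | zero => simp
  | succ i ih =>
    rw [Function.iterate_succ_apply', Function.iterate_succ_apply', ih]
    exact lcyclic_cast L hL _

-- ===== VERDICT (by name: the statement is the Claim_ definition above) =====
theorem max_shifts_spec : Claim_equal_max_shifts := by
  intro n _ hpre
  have hp : 1 ≤ n := hpre
  show max_shifts n = max_shifts_alt n
  simp only [max_shifts, max_shifts_alt]
  set L := PySem.Int.bitLength n with hLdef
  set m := n.toNat with hmdef
  have hnm : n = (m : Int) := by omega
  have hmlt : m < 2^L := by
    have h1 := PySem.Int.lt_two_pow_bitLength n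
    rw [← hLdef] at h1
    omega
  have hL1 : 1 ≤ L := by
    by_contra hc
    have hc0 : L = 0 := by omega
    rw [hc0] at hmlt
    norm_num at hmlt
    omega
  have hcast1 : ((L - 1 : Nat) : Int) + 1 = (L : Int) := by omega
  rw [hcast1]
  have hcast2 : (L : Int) - 1 = ((L - 1 : Nat) : Int) := by omega
  rw [hcast2]
  rw [foldl_const_iterate (fun st : Int × Int =>
    (lcyclic_shift st.1 (L : Int),
      if lcyclic_shift st.1 (L : Int) > st.2 then lcyclic_shift st.1 (L : Int) else st.2))]
  have hlen : (PySem.List.pyRange 0 ((L - 1 : Nat) : Int) 1).length = L - 1 := by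
    simp [PySem.List.pyRange_zero_natCast]
  rw [hlen, hnm]
  rw [hIter (fun v => lcyclic_shift v (L : Int)) ((m : Nat) : Int) (L - 1)]
  obtain ⟨k, hk⟩ : ∃ k, L = k + 1 := ⟨L - 1, by omega⟩
  have hval : ∀ i, i ≤ L →
      ((fun v => lcyclic_shift v ((L : Nat) : Int))^[i] ((m : Nat) : Int) : Int)
        = PySem.Int.band (PySem.Int.bor (((m : Nat) : Int) <<< i) (((m : Nat) : Int) >>> (L - i)))
            (((1 : Int) <<< L) - 1) := by
    intro i hi
    rw [iter_cast L hL1 m i, rotN_iterate L hL1 m hmlt i hi, bfun_eq L hL1 m hmlt i hi]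
  rw [hk]
  simp only [Nat.add_sub_cancel]
  rw [List.range_succ_eq_map, List.map_cons, List.map_map, PySem.List.max?_id_cons,
    Option.getD_some]
  have h0 : PySem.Int.band (PySem.Int.bor (((m : Nat) : Int) <<< (0 : Nat))
      (((m : Nat) : Int) >>> (k + 1 - 0))) (((1 : Int) <<< (k + 1)) - 1) = ((m : Nat) : Int) := by
    have := (hval 0 (by omega)).symm
    rw [hk] at this
    simpa using this
  have hcongr : ∀ i ∈ List.range k,
      (fun v => lcyclic_shift v ((k + 1 : Nat) : Int))^[i + 1] ((m : Nat) : Int)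
        = PySem.Int.band (PySem.Int.bor (((m : Nat) : Int) <<< (i + 1))
            (((m : Nat) : Int) >>> (k + 1 - (i + 1)))) (((1 : Int) <<< (k + 1)) - 1) := by
    intro i hi
    have hiL : i + 1 ≤ L := by rw [hk]; have := List.mem_range.mp hi; omega
    have := hval (i + 1) hiL
    rw [hk] at this
    exact this
  simp only [Function.comp_def]
  rw [← List.map_congr_left hcongr, h0]
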